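-- pv_equiv track=rewrite | github.com/Denmads/AdventOfCodePy | 2021/days/day7.py | get_summed_dist_expensive
-- ===== SOURCE A (Python) =====
-- def get_summed_dist_expensive(positions, pos):
--     total = 0
--     precalc = {}
--     for key_pos in positions.keys():
--         kpi = int(key_pos)
--         if key_pos in precalc:
--             dist = precalc[key_pos]
--         else:
--             dist = sum(range(1, abs(kpi - pos)+1))
--             precalc[key_pos] = dist
--         total += dist * positions[key_pos]
--     return total
-- ===== SOURCE B (Python) =====
-- def get_summed_dist_expensive(positions, pos):
--     return sum(abs(p - pos) * (abs(p - pos) + 1) // 2 * c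
--                for p, c in positions.items())
-- ===== Notes on version B (the rewrite author's own statement) =====
-- stated objective: faster
-- what changed: Replaces the per-key sum(range(1, d+1)) loop (plus an unused memo dict) by the triangular-number closed form d*(d+1)//2 inside a single sum over items.
import Mathlib
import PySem

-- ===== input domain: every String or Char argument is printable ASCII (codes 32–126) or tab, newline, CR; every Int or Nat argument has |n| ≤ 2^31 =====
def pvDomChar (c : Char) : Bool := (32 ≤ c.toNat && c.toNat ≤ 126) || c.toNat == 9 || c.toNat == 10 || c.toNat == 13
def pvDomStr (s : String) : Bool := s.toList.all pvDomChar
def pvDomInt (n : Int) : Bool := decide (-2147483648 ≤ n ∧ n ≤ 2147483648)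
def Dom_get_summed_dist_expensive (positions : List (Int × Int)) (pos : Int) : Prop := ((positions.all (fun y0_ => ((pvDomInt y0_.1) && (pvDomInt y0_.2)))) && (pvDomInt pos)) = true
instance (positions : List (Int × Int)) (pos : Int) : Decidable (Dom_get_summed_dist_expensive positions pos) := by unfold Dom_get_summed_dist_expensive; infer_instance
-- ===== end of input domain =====

-- B replaces A's per-key sum(range(1, d+1)) loop (and its unused memo dict) by the
-- closed form d*(d+1)//2 in one pass over the items (objective: faster).

-- ===== PORT A =====
-- sum(range(a, b+1)) iterated one term at a time with an accumulator, exactly as Python's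
-- sum iterates the range object (same terms, same order; no list is materialized).
def pvSumUpTo (a b acc : Int) : Int :=
  if a ≤ b then pvSumUpTo (a + 1) b (acc + a) else acc
termination_by (b + 1 - a).toNat
decreasing_by omega

-- A iterates over the dict's keys, recomputes dist = sum(range(1, |k-pos|+1)) (the memo
-- dict 'precalc' never hits, keys being unique, but is transliterated faithfully) and
-- accumulates dist * positions[k].
def get_summed_dist_expensive (positions : List (Int × Int)) (pos : Int) : Int :=
  let d := PySem.Dict.ofList positions
  (d.keys.foldl
    (fun (acc : Int × PySem.Dict Int Int) key_pos =>
      let kpi := key_pos  -- int(key_pos): keys are already ints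
      match acc.2.get? key_pos with
      | some dist => (acc.1 + dist * d.getD key_pos 0, acc.2)
      | none =>
          let dist := pvSumUpTo 1 |kpi - pos| 0
          (acc.1 + dist * d.getD key_pos 0, acc.2.insert key_pos dist))
    (0, PySem.Dict.empty)).1

-- ===== PORT B =====
def get_summed_dist_expensive_alt (positions : List (Int × Int)) (pos : Int) : Int :=
  ((PySem.Dict.ofList positions).items.map
    (fun pc => PySem.Int.floordiv (|pc.1 - pos| * (|pc.1 - pos| + 1)) 2 * pc.2)).sum

-- ===== PRECONDITION & SPEC =====
def Spec_get_summed_dist_expensive (positions : List (Int × Int)) (pos : Int) (out : Int) : Prop := out = get_summed_dist_expensive_alt positions pos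
instance (positions : List (Int × Int)) (pos : Int) (out : Int) : Decidable (Spec_get_summed_dist_expensive positions pos out) := by unfold Spec_get_summed_dist_expensive; infer_instance

-- ===== CLAIM (what is proved, stated in full; the proofs are below) =====
def Claim_equal_get_summed_dist_expensive : Prop := ∀ (positions : List (Int × Int)) (pos : Int), Dom_get_summed_dist_expensive positions pos → Spec_get_summed_dist_expensive positions pos (get_summed_dist_expensive positions pos)

-- ===== LEMMAS AND PROOFS =====

-- the accumulator loop is the sum of the range
theorem pv_sumUpTo_eq (a b acc : Int) :
    pvSumUpTo a b acc = acc + (PySem.List.pyRange a (b + 1) 1).sum := by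
  induction a, acc using pvSumUpTo.induct b with
  | case1 a acc h ih =>
      rw [pvSumUpTo, if_pos h, ih, PySem.List.pyRange_one_cons (by omega : a < b + 1)]
      simp; ring
  | case2 a acc h =>
      rw [pvSumUpTo, if_neg h, PySem.List.pyRange_one_eq_nil (by omega : b + 1 ≤ a)]
      simp

-- sum(range(1, n+1)) = n*(n+1)//2
theorem pv_tri_sum (n : Int) (hn : 0 ≤ n) :
    (PySem.List.pyRange 1 (n + 1) 1).sum = PySem.Int.floordiv (n * (n + 1)) 2 := by
  induction n, hn using Int.le_induction with
  | base =>
      rw [PySem.List.pyRange_one_eq_nil (by norm_num)]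
      simp
  | succ n hn ih =>
      rw [PySem.List.pyRange_one_succ_right (by omega), List.sum_append, ih]
      rw [PySem.Int.floordiv_eq_ediv_of_pos (by norm_num : (0:Int) < 2),
          PySem.Int.floordiv_eq_ediv_of_pos (by norm_num : (0:Int) < 2)]
      have h : (n + 1) * (n + 1 + 1) = n * (n + 1) + (n + 1) * 2 := by ring
      rw [h, Int.add_mul_ediv_right _ _ (by norm_num : (2:Int) ≠ 0)]
      simp

-- A's loop over distinct keys, none of which the memo dict contains yet, sums the
-- per-key terms.
theorem pv_loopA (d : PySem.Dict Int Int) (pos : Int) (l : List Int)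
    (pc : PySem.Dict Int Int) (t : Int)
    (hnd : l.Nodup) (hpc : ∀ k ∈ l, pc.get? k = none) :
    (l.foldl
      (fun (acc : Int × PySem.Dict Int Int) key_pos =>
        match acc.2.get? key_pos with
        | some dist => (acc.1 + dist * d.getD key_pos 0, acc.2)
        | none =>
            let dist := pvSumUpTo 1 |key_pos - pos| 0
            (acc.1 + dist * d.getD key_pos 0, acc.2.insert key_pos dist))
      (t, pc)).1
    = t + (l.map (fun k => pvSumUpTo 1 |k - pos| 0 * d.getD k 0)).sum := by
  induction l generalizing pc t with
  | nil => simp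
  | cons k rest ih =>
      have hk : pc.get? k = none := hpc k (List.mem_cons_self)
      simp only [List.foldl_cons, hk, List.map_cons, List.sum_cons]
      have hrest : ∀ k' ∈ rest, (pc.insert k (pvSumUpTo 1 |k - pos| 0)).get? k' = none := by
        intro k' hk'
        have hne : k' ≠ k := fun h => (List.nodup_cons.mp hnd).1 (h ▸ hk')
        rw [PySem.Dict.get?_insert_of_ne _ _ hne]
        exact hpc k' (List.mem_cons_of_mem _ hk')
      rw [ih _ _ (List.Nodup.of_cons hnd) hrest]
      ring

-- ===== VERDICT (by name: the statement is the Claim_ definition above) =====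
theorem get_summed_dist_expensive_spec : Claim_equal_get_summed_dist_expensive := by
  intro positions pos _
  unfold Spec_get_summed_dist_expensive get_summed_dist_expensive get_summed_dist_expensive_alt
  set d := PySem.Dict.ofList positions with hd
  have hnd : d.keys.Nodup := PySem.Dict.nodup_keys_ofList positions
  rw [pv_loopA d pos d.keys PySem.Dict.empty 0 hnd (fun k _ => PySem.Dict.get?_empty k)]
  rw [PySem.Dict.items_eq_map_keys d hnd 0, List.map_map]
  rw [zero_add]
  congr 1
  refine List.map_congr_left (fun k _ => ?_)
  simp only [Function.comp]
  rw [pv_sumUpTo_eq, zero_add, pv_tri_sum _ (abs_nonneg _)]
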